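-- pv_equiv track=rewrite | github.com/keeker765/CCT | kaggle_upload/cct-code/src/model/net2wider.py | auto_donor_mapping
-- ===== SOURCE A (Python) =====
-- from typing import Optional, Dict
--
-- def auto_donor_mapping(
--     column_layers: list,
--     num_base_layers: int,
--     front_layers: list,
--     back_layers: list,
-- ) -> Dict[int, int]:
--     """自动计算 column → donor 映射 (就近原则)
--
--     每个 column 层选最近的未使用层作为 donor。
--
--     Returns:
--         mapping: {column_layer_idx: donor_layer_idx}
--     """
--     used = set(front_layers + column_layers + back_layers)
--     unused = sorted(set(range(num_base_layers)) - used)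
--
--     mapping = {}
--     remaining = list(unused)
--     for col_idx in column_layers:
--         if not remaining:
--             break
--         # 选最近的未使用层
--         nearest = min(remaining, key=lambda u: abs(u - col_idx))
--         mapping[col_idx] = nearest
--         remaining.remove(nearest)
--
--     return mapping
-- ===== SOURCE B (Python) =====
-- def auto_donor_mapping(
--     column_layers: list,
--     num_base_layers: int,
--     front_layers: list,
--     back_layers: list,
-- ):
--     """Nearest-unused-donor mapping via binary search on the sorted free list
--     instead of a full min-scan per column layer."""
--     used = set(front_layers + column_layers + back_layers)
--     remaining = [x for x in range(num_base_layers) if x not in used]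
--
--     mapping = {}
--     for col_idx in column_layers:
--         if not remaining:
--             break
--         # binary search: first index i with remaining[i] >= col_idx
--         lo, hi = 0, len(remaining)
--         while lo < hi:
--             mid = (lo + hi) // 2
--             if remaining[mid] < col_idx:
--                 lo = mid + 1
--             else:
--                 hi = mid
--         # nearest is remaining[lo-1] or remaining[lo]; tie goes to the lower value
--         if lo == 0:
--             j = 0
--         elif lo == len(remaining):
--             j = lo - 1
--         elif col_idx - remaining[lo - 1] <= remaining[lo] - col_idx:
--             j = lo - 1
--         else:
--             j = lo
--         mapping[col_idx] = remaining.pop(j)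
--     return mapping
-- ===== Notes on version B (the rewrite author's own statement) =====
-- stated objective: faster
-- what changed: Per column layer, the O(k) min-scan with an abs-distance key plus list.remove is replaced by a hand-written binary search over the (always sorted) free list picking predecessor/successor with ties to the lower value, then pop(j).
import Mathlib
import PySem

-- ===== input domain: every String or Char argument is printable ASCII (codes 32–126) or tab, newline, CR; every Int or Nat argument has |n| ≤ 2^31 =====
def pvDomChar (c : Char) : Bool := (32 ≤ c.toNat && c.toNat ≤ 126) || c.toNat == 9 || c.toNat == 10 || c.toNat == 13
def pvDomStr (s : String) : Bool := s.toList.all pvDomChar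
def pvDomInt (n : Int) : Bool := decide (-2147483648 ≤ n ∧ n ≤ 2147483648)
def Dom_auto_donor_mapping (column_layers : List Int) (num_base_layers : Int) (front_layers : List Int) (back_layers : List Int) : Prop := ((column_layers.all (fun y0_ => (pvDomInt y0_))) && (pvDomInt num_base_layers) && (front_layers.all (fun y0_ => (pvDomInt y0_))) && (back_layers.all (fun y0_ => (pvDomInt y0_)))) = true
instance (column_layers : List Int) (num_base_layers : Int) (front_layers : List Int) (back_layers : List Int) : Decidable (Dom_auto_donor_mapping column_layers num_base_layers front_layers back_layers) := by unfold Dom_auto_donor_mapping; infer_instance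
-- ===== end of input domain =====

-- B replaces A's per-column O(k) min-scan (min with an abs-distance key) + list.remove by a
-- binary search over the always-sorted free list (predecessor/successor, ties to the lower
-- value) + pop(j); equal return values are proved below.

-- ===== PORT A =====
-- A's 'for col_idx in column_layers' loop ('break' on empty remaining returns the mapping)
def pvLoopA (cols : List Int) (m : PySem.Dict Int Int) (rem : List Int) : PySem.Dict Int Int :=
  match cols with
  | [] => m
  | c :: cs =>
    if rem.isEmpty then m
    else
      match PySem.List.min? rem (fun u => (u - c).natAbs) with
      | none => m   -- unreachable: rem is nonempty here
      | some nearest =>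
        pvLoopA cs (m.insert c nearest) ((PySem.List.remove? rem nearest).getD rem)
          -- remove? never fails here: nearest ∈ rem (min?_mem)

def auto_donor_mapping (column_layers : List Int) (num_base_layers : Int) (front_layers : List Int) (back_layers : List Int) : List (Int × Int) :=
  (pvLoopA column_layers (PySem.Dict.mk [])
    (PySem.List.sorted
      (PySem.Set.diff (PySem.Set.ofList (PySem.List.pyRange 0 num_base_layers 1))
        (PySem.Set.ofList (front_layers ++ column_layers ++ back_layers)))
      (fun x => x))).items

-- ===== PORT B =====
-- Source B's hand-written bisect_left loop: while lo < hi: mid=(lo+hi)//2; …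
-- (lo, hi, mid are nonnegative and mid is provably < len(remaining), so Nat indices with getD are exact)
def pvBisect (rem : List Int) (c : Int) (lo hi : Nat) : Nat :=
  if _h : lo < hi then
    if rem.getD ((lo + hi) / 2) 0 < c then pvBisect rem c ((lo + hi) / 2 + 1) hi
    else pvBisect rem c lo ((lo + hi) / 2)
  else lo
termination_by hi - lo
decreasing_by all_goals omega

-- Source B's 'for col_idx in column_layers' loop
def pvLoopB (cols : List Int) (m : PySem.Dict Int Int) (rem : List Int) : PySem.Dict Int Int :=
  match cols with
  | [] => m
  | c :: cs =>
    if rem.isEmpty then m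
    else
      let i := pvBisect rem c 0 rem.length
      let j := if i = 0 then 0
               else if i = rem.length then i - 1
               else if c - rem.getD (i - 1) 0 ≤ rem.getD i 0 - c then i - 1
               else i
      match PySem.List.pop? rem (j : Int) with
      | none => m   -- unreachable: j < len(rem)
      | some (v, rest) => pvLoopB cs (m.insert c v) rest

def auto_donor_mapping_alt (column_layers : List Int) (num_base_layers : Int) (front_layers : List Int) (back_layers : List Int) : List (Int × Int) :=
  (pvLoopB column_layers (PySem.Dict.mk [])
    ((PySem.List.pyRange 0 num_base_layers 1).filter
      (fun x => !(PySem.Set.contains (PySem.Set.ofList (front_layers ++ column_layers ++ back_layers)) x)))).items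

-- ===== PRECONDITION & SPEC =====
def Spec_auto_donor_mapping (column_layers : List Int) (num_base_layers : Int) (front_layers : List Int) (back_layers : List Int) (out : List (Int × Int)) : Prop := out = auto_donor_mapping_alt column_layers num_base_layers front_layers back_layers
instance (column_layers : List Int) (num_base_layers : Int) (front_layers : List Int) (back_layers : List Int) (out : List (Int × Int)) : Decidable (Spec_auto_donor_mapping column_layers num_base_layers front_layers back_layers out) := by unfold Spec_auto_donor_mapping; infer_instance

-- ===== CLAIM (what is proved, stated in full; the proofs are below) =====
def Claim_equal_auto_donor_mapping : Prop := ∀ (column_layers : List Int) (num_base_layers : Int) (front_layers : List Int) (back_layers : List Int), Dom_auto_donor_mapping column_layers num_base_layers front_layers back_layers → Spec_auto_donor_mapping column_layers num_base_layers front_layers back_layers (auto_donor_mapping column_layers num_base_layers front_layers back_layers)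

-- ===== LEMMAS AND PROOFS =====

-- strict sortedness read through getD
theorem pv_sorted_getD {rem : List Int} (hs : rem.Pairwise (· < ·)) {k l : Nat}
    (hkl : k < l) (hl : l < rem.length) : rem.getD k 0 < rem.getD l 0 := by
  rw [List.getD_eq_getElem rem 0 (hkl.trans hl), List.getD_eq_getElem rem 0 hl]
  exact (List.pairwise_iff_getElem.mp hs) k l (hkl.trans hl) hl hkl

-- invariant of the binary-search loop
theorem pvBisect_spec (rem : List Int) (c : Int) (hs : rem.Pairwise (· < ·)) :
    ∀ (lo hi : Nat), lo ≤ hi → hi ≤ rem.length →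
    (∀ k, k < lo → rem.getD k 0 < c) →
    (∀ k, hi ≤ k → k < rem.length → c ≤ rem.getD k 0) →
    lo ≤ pvBisect rem c lo hi ∧ pvBisect rem c lo hi ≤ hi ∧
    (∀ k, k < pvBisect rem c lo hi → rem.getD k 0 < c) ∧
    (∀ k, pvBisect rem c lo hi ≤ k → k < rem.length → c ≤ rem.getD k 0) := by
  intro lo hi
  induction lo, hi using pvBisect.induct rem c with
  | case1 lo hi h hlt ih =>
    intro hle hhi h1 h2
    rw [pvBisect, dif_pos h, if_pos hlt]
    obtain ⟨q1, q2, q3, q4⟩ := ih (by omega) hhi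
      (fun k hk => by
        rcases Nat.lt_or_ge k ((lo + hi) / 2) with hk' | hk'
        · exact (pv_sorted_getD hs hk' (by omega)).trans hlt
        · have hkm : k = (lo + hi) / 2 := by omega
          rw [hkm]; exact hlt) h2
    exact ⟨by omega, q2, q3, q4⟩
  | case2 lo hi h hlt ih =>
    intro hle hhi h1 h2
    rw [pvBisect, dif_pos h, if_neg hlt]
    obtain ⟨q1, q2, q3, q4⟩ := ih (by omega) (by omega) h1
      (fun k hk hk' => by
        rcases Nat.eq_or_lt_of_le hk with hk'' | hk''
        · rw [← hk'']; exact not_lt.mp hlt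
        · exact (not_lt.mp hlt).trans (pv_sorted_getD hs hk'' hk').le)
    exact ⟨q1, by omega, q3, q4⟩
  | case3 lo hi h =>
    intro hle hhi h1 h2
    rw [pvBisect, dif_neg h]
    have heq : lo = hi := by omega
    subst heq
    exact ⟨le_refl _, le_refl _, h1, h2⟩

-- the fold step of Python's min(xs, key) (keeps the first key-minimal element)
def pvMinStep (key : Int → Nat) (acc : Option Int) (x : Int) : Option Int :=
  match acc with
  | none => some x
  | some m => if key x < key m then some x else some m

theorem pvMinStep_none (key : Int → Nat) (x : Int) : pvMinStep key none x = some x := rfl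
theorem pvMinStep_some (key : Int → Nat) (a x : Int) :
    pvMinStep key (some a) x = if key x < key a then some x else some a := rfl

-- once the accumulator holds a key-minimal element it never changes
theorem pv_foldl_min_stay (key : Int → Nat) (t : List Int) (a : Int)
    (h : ∀ k, k < t.length → key a ≤ key (t.getD k 0)) :
    t.foldl (pvMinStep key) (some a) = some a := by
  induction t with
  | nil => rfl
  | cons x t ih =>
    have hx : key a ≤ key x := by have := h 0 (by simp); simpa using this
    rw [List.foldl_cons, pvMinStep_some, if_neg (by omega)]
    exact ih (fun k hk => by have := h (k + 1) (by simpa using hk); simpa using this)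

-- Python's min(xs, key) is the FIRST element achieving the minimal key
theorem pv_foldl_min_first (key : Int → Nat) :
    ∀ (xs : List Int) (j : Nat), j < xs.length → ∀ (acc : Option Int),
    (∀ k, k < xs.length → key (xs.getD j 0) ≤ key (xs.getD k 0)) →
    (∀ k, k < j → key (xs.getD j 0) < key (xs.getD k 0)) →
    (∀ a, acc = some a → key (xs.getD j 0) < key a) →
    xs.foldl (pvMinStep key) acc = some (xs.getD j 0) := by
  intro xs
  induction xs with
  | nil => intro j hj; simp at hj
  | cons x t ih =>
    intro j hj acc hmin hfirst hacc
    match j with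
    | 0 =>
      have hstep : pvMinStep key acc x = some x := by
        match acc with
        | none => rfl
        | some a => rw [pvMinStep_some, if_pos (by simpa using hacc a rfl)]
      rw [List.foldl_cons, hstep, List.getD_cons_zero]
      exact pv_foldl_min_stay key t x
        (fun k hk => by have := hmin (k + 1) (by simpa using hk); simpa using this)
    | jj + 1 =>
      have hj' : jj < t.length := by simpa using hj
      have hx : key (t.getD jj 0) < key x := by
        have := hfirst 0 (Nat.succ_pos _); simpa using this
      have hstep : ∀ b, pvMinStep key acc x = some b → key (t.getD jj 0) < key b := by
        intro b hb
        match acc with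
        | none => rw [pvMinStep_none] at hb; cases hb; exact hx
        | some a =>
          rw [pvMinStep_some] at hb
          by_cases hc : key x < key a
          · rw [if_pos hc] at hb; cases hb; exact hx
          · rw [if_neg hc] at hb; cases hb; exact hacc _ rfl
      rw [List.foldl_cons, List.getD_cons_succ]
      exact ih jj hj' _
        (fun k hk => by have := hmin (k + 1) (by simpa using hk); simpa using this)
        (fun k hk => by have := hfirst (k + 1) (by simpa using hk); simpa using this)
        hstep

-- the per-step agreement: on a sorted nonempty free list, A's min-by-abs-distance IS B's
-- binary-search pick
theorem pv_step (rem : List Int) (c : Int) (hs : rem.Pairwise (· < ·)) (hne : rem ≠ []) :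
    ∀ j : Nat, j = (if pvBisect rem c 0 rem.length = 0 then 0
        else if pvBisect rem c 0 rem.length = rem.length then pvBisect rem c 0 rem.length - 1
        else if c - rem.getD (pvBisect rem c 0 rem.length - 1) 0 ≤ rem.getD (pvBisect rem c 0 rem.length) 0 - c then pvBisect rem c 0 rem.length - 1
        else pvBisect rem c 0 rem.length) →
    j < rem.length ∧
    PySem.List.min? rem (fun u => (u - c).natAbs) = some (rem.getD j 0) := by
  intro j hj
  have hlen : 0 < rem.length := List.length_pos_iff.mpr hne
  obtain ⟨-, hile, h1, h2⟩ := pvBisect_spec rem c hs 0 rem.length (by omega) (le_refl _)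
    (by omega) (fun k hk hk' => by omega)
  set i := pvBisect rem c 0 rem.length with hidef
  have key_mono : ∀ k l : Nat, k < l → l < rem.length → rem.getD k 0 < rem.getD l 0 :=
    fun k l hkl hl => pv_sorted_getD hs hkl hl
  have hjlt : j < rem.length := by rw [hj]; split_ifs <;> omega
  refine ⟨hjlt, ?_⟩
  have hmq : PySem.List.min? rem (fun u => (u - c).natAbs) =
      rem.foldl (pvMinStep (fun u => (u - c).natAbs)) none := by
    simp only [PySem.List.min?]
    apply PySem.List.foldl_congr_mem
    intro acc x _
    cases acc <;> rfl
  rw [hmq]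
  apply pv_foldl_min_first (fun u => (u - c).natAbs) rem j hjlt none _ _ (by intro a h; cases h)
  · -- minimality
    intro k hk
    simp only []
    rcases Nat.eq_zero_or_pos i with h0 | hpos
    · -- i = 0 : c ≤ every element, j = 0
      have hj0 : j = 0 := by rw [hj]; split_ifs; omega
      have hc : c ≤ rem.getD 0 0 := h2 0 (by omega) hlen
      have hck : c ≤ rem.getD k 0 := h2 k (by omega) hk
      have : rem.getD 0 0 ≤ rem.getD k 0 := by
        rcases Nat.eq_zero_or_pos k with hk0 | hk0
        · rw [hk0]
        · exact (key_mono 0 k hk0 hk).le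
      rw [hj0]; omega
    by_cases hil : i = rem.length
    · -- i = len : every element < c, j = len - 1
      have hjv : j = rem.length - 1 := by rw [hj]; split_ifs <;> omega
      have hkc : rem.getD k 0 < c := h1 k (by omega)
      have hjc : rem.getD j 0 < c := h1 j (by omega)
      have : rem.getD k 0 ≤ rem.getD j 0 := by
        rcases Nat.lt_or_ge k j with hkj | hkj
        · exact (key_mono k j hkj hjlt).le
        · have : k = j := by omega
          rw [this]
      omega
    · -- 0 < i < len : predecessor rem[i-1] < c ≤ rem[i]
      have hilen : i < rem.length := by omega
      have hpred : rem.getD (i - 1) 0 < c := h1 (i - 1) (by omega)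
      have hsucc : c ≤ rem.getD i 0 := h2 i (le_refl _) hilen
      by_cases htie : c - rem.getD (i - 1) 0 ≤ rem.getD i 0 - c
      · -- j = i - 1, distance c - rem[i-1]
        have hjv : j = i - 1 := by rw [hj]; split_ifs <;> omega
        rcases Nat.lt_or_ge k i with hki | hki
        · -- k ≤ i-1 : rem[k] ≤ rem[i-1] < c
          have hkc : rem.getD k 0 < c := h1 k hki
          have : rem.getD k 0 ≤ rem.getD (i - 1) 0 := by
            rcases Nat.lt_or_ge k (i - 1) with hk' | hk'
            · exact (key_mono k (i - 1) hk' (by omega)).le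
            · have : k = i - 1 := by omega
              rw [this]
          rw [hjv]; omega
        · -- k ≥ i : c ≤ rem[i] ≤ rem[k]
          have hck : c ≤ rem.getD k 0 := h2 k hki hk
          have : rem.getD i 0 ≤ rem.getD k 0 := by
            rcases Nat.lt_or_ge i k with hk' | hk'
            · exact (key_mono i k hk' hk).le
            · have : k = i := by omega
              rw [this]
          rw [hjv]; omega
      · -- j = i, distance rem[i] - c < c - rem[i-1]
        have hjv : j = i := by rw [hj]; split_ifs <;> omega
        rcases Nat.lt_or_ge k i with hki | hki
        · have hkc : rem.getD k 0 < c := h1 k hki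
          have : rem.getD k 0 ≤ rem.getD (i - 1) 0 := by
            rcases Nat.lt_or_ge k (i - 1) with hk' | hk'
            · exact (key_mono k (i - 1) hk' (by omega)).le
            · have : k = i - 1 := by omega
              rw [this]
          rw [hjv]; omega
        · have hck : c ≤ rem.getD k 0 := h2 k hki hk
          have : rem.getD i 0 ≤ rem.getD k 0 := by
            rcases Nat.lt_or_ge i k with hk' | hk'
            · exact (key_mono i k hk' hk).le
            · have : k = i := by omega
              rw [this]
          rw [hjv]; omega
  · -- strictness before j: every earlier element is strictly farther
    intro k hkj
    simp only []
    rcases Nat.eq_zero_or_pos i with h0 | hpos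
    · have : j = 0 := by rw [hj]; split_ifs; omega
      omega
    by_cases hil : i = rem.length
    · -- j = len-1 and all elements < c: earlier means strictly smaller, strictly farther
      have hjv : j = rem.length - 1 := by rw [hj]; split_ifs <;> omega
      have hkc : rem.getD k 0 < c := h1 k (by omega)
      have hjc : rem.getD j 0 < c := h1 j (by omega)
      have : rem.getD k 0 < rem.getD j 0 := key_mono k j hkj hjlt
      omega
    · have hilen : i < rem.length := by omega
      have hpred : rem.getD (i - 1) 0 < c := h1 (i - 1) (by omega)
      have hsucc : c ≤ rem.getD i 0 := h2 i (le_refl _) hilen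
      by_cases htie : c - rem.getD (i - 1) 0 ≤ rem.getD i 0 - c
      · -- j = i-1, k < i-1 : rem[k] < rem[i-1] < c
        have hjv : j = i - 1 := by rw [hj]; split_ifs <;> omega
        have hkc : rem.getD k 0 < c := h1 k (by omega)
        have : rem.getD k 0 < rem.getD j 0 := key_mono k j hkj hjlt
        rw [hjv] at this ⊢; omega
      · -- j = i, k < i : rem[k] ≤ rem[i-1]; distance ≥ c - rem[i-1] > rem[i] - c
        have hjv : j = i := by rw [hj]; split_ifs <;> omega
        have hkc : rem.getD k 0 < c := h1 k (by omega)
        have hk' : rem.getD k 0 ≤ rem.getD (i - 1) 0 := by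
          rcases Nat.lt_or_ge k (i - 1) with hk' | hk'
          · exact (key_mono k (i - 1) hk' (by omega)).le
          · have : k = i - 1 := by omega
            rw [this]
        rw [hjv]; omega

-- the two loops agree on a sorted free list
theorem pv_loops_eq (cols : List Int) :
    ∀ (m : PySem.Dict Int Int) (rem : List Int), rem.Pairwise (· < ·) →
    pvLoopA cols m rem = pvLoopB cols m rem := by
  induction cols with
  | nil => intro m rem _; rfl
  | cons c cs ih =>
    intro m rem hs
    by_cases hne : rem = []
    · subst hne; rfl
    · have hemp : rem.isEmpty = false := by
        cases rem with
        | nil => exact absurd rfl hne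
        | cons a l => rfl
      obtain ⟨hjlt, hmin⟩ := pv_step rem c hs hne _ rfl
      set j : Nat := (if pvBisect rem c 0 rem.length = 0 then 0
        else if pvBisect rem c 0 rem.length = rem.length then pvBisect rem c 0 rem.length - 1
        else if c - rem.getD (pvBisect rem c 0 rem.length - 1) 0 ≤ rem.getD (pvBisect rem c 0 rem.length) 0 - c then pvBisect rem c 0 rem.length - 1
        else pvBisect rem c 0 rem.length) with hjdef
      have hnd : rem.Nodup := hs.imp (fun h => ne_of_lt h)
      have hgd : rem.getD j 0 = rem[j]'hjlt := List.getD_eq_getElem rem 0 hjlt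
      have hmem : rem.getD j 0 ∈ rem := by rw [hgd]; exact List.getElem_mem hjlt
      have hremove : PySem.List.remove? rem (rem.getD j 0) = some (rem.erase (rem.getD j 0)) :=
        PySem.List.remove?_eq_some_erase rem _ hmem
      have herase : rem.erase (rem.getD j 0) = rem.eraseIdx j := by
        rw [hgd]; exact List.Nodup.erase_getElem hnd j hjlt
      have hpop : PySem.List.pop? rem (j : Int) = some (rem[j]'hjlt, rem.eraseIdx j) :=
        PySem.List.pop?_natCast rem j hjlt
      show (if rem.isEmpty then m
        else match PySem.List.min? rem (fun u => (u - c).natAbs) with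
          | none => m
          | some nearest => pvLoopA cs (m.insert c nearest) ((PySem.List.remove? rem nearest).getD rem))
        = pvLoopB (c :: cs) m rem
      rw [pvLoopB]
      simp only [hemp, if_false, Bool.false_eq_true, hmin, ← hjdef, hpop]
      rw [hremove, herase, hgd]
      simp only [Option.getD_some]
      exact ih _ _ (hs.sublist (List.eraseIdx_sublist rem j))

-- A's initial 'unused' list IS B's initial 'remaining' list, and it is sorted
theorem pv_init (n : Int) (used : PySem.Set Int) :
    PySem.List.sorted (PySem.Set.diff (PySem.Set.ofList (PySem.List.pyRange 0 n 1)) used) (fun x => x) =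
      (PySem.List.pyRange 0 n 1).filter (fun x => !(PySem.Set.contains used x)) ∧
    ((PySem.List.pyRange 0 n 1).filter (fun x => !(PySem.Set.contains used x))).Pairwise (· < ·) := by
  have hnd : (PySem.List.pyRange 0 n 1).Nodup := PySem.List.nodup_pyRange_one 0 n
  have hof : PySem.Set.ofList (PySem.List.pyRange 0 n 1) = PySem.List.pyRange 0 n 1 :=
    PySem.Set.ofList_eq_self_of_nodup _ hnd
  have hpw : ((PySem.List.pyRange 0 n 1).filter (fun x => !(PySem.Set.contains used x))).Pairwise (· < ·) :=
    (PySem.List.pairwise_lt_pyRange_one 0 n).filter _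
  refine ⟨?_, hpw⟩
  have hdiff : PySem.Set.diff (PySem.Set.ofList (PySem.List.pyRange 0 n 1)) used =
      (PySem.List.pyRange 0 n 1).filter (fun x => !(PySem.Set.contains used x)) := by
    rw [hof]; rfl
  rw [hdiff]
  exact PySem.List.sorted_eq_of_perm_of_pairwise_lt _ _ _ (List.Perm.refl _) hpw

-- ===== VERDICT (by name: the statement is the Claim_ definition above) =====
theorem auto_donor_mapping_spec : Claim_equal_auto_donor_mapping := by
  intro cols n front back _
  unfold Spec_auto_donor_mapping auto_donor_mapping auto_donor_mapping_alt
  obtain ⟨heq, hpw⟩ := pv_init n (PySem.Set.ofList (front ++ cols ++ back))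
  rw [heq, pv_loops_eq cols _ _ hpw]
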